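-- pv_equiv track=rewrite | github.com/davenGIT/KafkaOnHDInsight | producer.py | is_machinesensor
-- ===== SOURCE A (Python) =====
-- machine_sensors = {'mass':{"machine":'mixer'}, 'rotation':{"machine":'mixer'}, 'fillpressure':{"machine":'mixer'}, 'bowltemp':{"machine":'mixer'}, 'ovenspeed':{"machine":'oven'},
--         'provetemp':{"machine":'oven'}, 'oventemp1':{"machine":'oven'}, 'oventemp2':{"machine":'oven'}, 'oventemp3':{"machine":'oven'}, 'cooltemp1':{"machine":'oven'},
--         'cooltemp2':{"machine":'oven'}, 'packspeed':{"machine":'packing'}, 'packcounter':{"machine":'packing'}}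
--
-- def get_sensors(machine_name):
--     return_list = []
--     for machine_sensor in machine_sensors:
--         if machine_sensors[machine_sensor]["machine"] == machine_name:
--             return_list.append((machine_sensor, machine_name))
--     return return_list
--
-- def is_machinesensor(machine_name, sensor_name):
--     return_val = False
--     sensors = get_sensors(machine_name)
--     for sensor, mc in sensors:
--         if mc == machine_name and sensor == sensor_name:
--             return_val = True
--             break
--     return return_val
-- ===== SOURCE B (Python) =====
-- # B: invert the table once into a flat sensor -> machine map; answer is one .get, no loops.
-- machine_sensors = {'mass':{"machine":'mixer'}, 'rotation':{"machine":'mixer'}, 'fillpressure':{"machine":'mixer'}, 'bowltemp':{"machine":'mixer'}, 'ovenspeed':{"machine":'oven'},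
--         'provetemp':{"machine":'oven'}, 'oventemp1':{"machine":'oven'}, 'oventemp2':{"machine":'oven'}, 'oventemp3':{"machine":'oven'}, 'cooltemp1':{"machine":'oven'},
--         'cooltemp2':{"machine":'oven'}, 'packspeed':{"machine":'packing'}, 'packcounter':{"machine":'packing'}}
--
-- _SENSOR_TO_MACHINE = {
--     'mass': 'mixer', 'rotation': 'mixer', 'fillpressure': 'mixer', 'bowltemp': 'mixer',
--     'ovenspeed': 'oven', 'provetemp': 'oven', 'oventemp1': 'oven', 'oventemp2': 'oven',
--     'oventemp3': 'oven', 'cooltemp1': 'oven', 'cooltemp2': 'oven',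
--     'packspeed': 'packing', 'packcounter': 'packing'}
--
-- def is_machinesensor(machine_name, sensor_name):
--     return _SENSOR_TO_MACHINE.get(sensor_name) == machine_name
-- ===== Notes on version B (the rewrite author's own statement) =====
-- stated objective: simpler
-- what changed: Replaced A's build-a-filtered-list-then-rescan double loop over the nested dict with a flat sensor-to-machine map consulted by one keyed .get; no loops remain.
import Mathlib
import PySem

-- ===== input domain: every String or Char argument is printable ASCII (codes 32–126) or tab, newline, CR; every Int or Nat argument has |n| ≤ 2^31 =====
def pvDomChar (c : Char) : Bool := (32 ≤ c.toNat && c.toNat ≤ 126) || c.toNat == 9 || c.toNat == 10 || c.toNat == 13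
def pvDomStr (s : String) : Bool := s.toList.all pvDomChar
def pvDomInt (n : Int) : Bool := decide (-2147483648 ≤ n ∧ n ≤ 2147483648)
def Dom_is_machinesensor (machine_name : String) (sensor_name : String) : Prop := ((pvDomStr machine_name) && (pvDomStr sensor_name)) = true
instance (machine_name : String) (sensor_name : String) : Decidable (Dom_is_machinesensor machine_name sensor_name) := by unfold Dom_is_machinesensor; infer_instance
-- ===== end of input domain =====

-- B replaces A's build-a-filtered-list-then-rescan double loop over the nested dict with a flat
-- sensor->machine map consulted by one keyed lookup (simpler; no loops).

-- ===== PORT A =====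
-- A's module-level nested dict machine_sensors
def machineSensors : PySem.Dict String (PySem.Dict String String) :=
  PySem.Dict.mk
    [("mass", PySem.Dict.mk [("machine", "mixer")]),
     ("rotation", PySem.Dict.mk [("machine", "mixer")]),
     ("fillpressure", PySem.Dict.mk [("machine", "mixer")]),
     ("bowltemp", PySem.Dict.mk [("machine", "mixer")]),
     ("ovenspeed", PySem.Dict.mk [("machine", "oven")]),
     ("provetemp", PySem.Dict.mk [("machine", "oven")]),
     ("oventemp1", PySem.Dict.mk [("machine", "oven")]),
     ("oventemp2", PySem.Dict.mk [("machine", "oven")]),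
     ("oventemp3", PySem.Dict.mk [("machine", "oven")]),
     ("cooltemp1", PySem.Dict.mk [("machine", "oven")]),
     ("cooltemp2", PySem.Dict.mk [("machine", "oven")]),
     ("packspeed", PySem.Dict.mk [("machine", "packing")]),
     ("packcounter", PySem.Dict.mk [("machine", "packing")])]

-- machine_sensors[k]["machine"]; both keys are always present in the fixed literal, so getD never sees its default
def msMachine (k : String) : String :=
  PySem.Dict.getD (PySem.Dict.getD machineSensors k PySem.Dict.empty) "machine" ""

def get_sensors (machine_name : String) : List (String × String) :=
  (PySem.Dict.keys machineSensors).foldl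
    (fun acc ms => if msMachine ms == machine_name then acc ++ [(ms, machine_name)] else acc) []

-- the for-loop with break in is_machinesensor
def isLoopA : List (String × String) → String → String → Bool
  | [], _, _ => false
  | (sensor, mc) :: rest, mn, sn =>
      if mc == mn && sensor == sn then true else isLoopA rest mn sn

def is_machinesensor (machine_name : String) (sensor_name : String) : Bool :=
  isLoopA (get_sensors machine_name) machine_name sensor_name

-- ===== PORT B =====
-- B's flat module-level dict _SENSOR_TO_MACHINE
def sensorToMachine : PySem.Dict String String :=
  PySem.Dict.mk
    [("mass", "mixer"), ("rotation", "mixer"), ("fillpressure", "mixer"), ("bowltemp", "mixer"),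
     ("ovenspeed", "oven"), ("provetemp", "oven"), ("oventemp1", "oven"), ("oventemp2", "oven"),
     ("oventemp3", "oven"), ("cooltemp1", "oven"), ("cooltemp2", "oven"),
     ("packspeed", "packing"), ("packcounter", "packing")]

-- '_SENSOR_TO_MACHINE.get(sensor_name) == machine_name' (None == a string is False)
def is_machinesensor_alt (machine_name : String) (sensor_name : String) : Bool :=
  match PySem.Dict.get? sensorToMachine sensor_name with
  | some m => m == machine_name
  | none => false

-- ===== PRECONDITION & SPEC =====
def Spec_is_machinesensor (machine_name : String) (sensor_name : String) (out : Bool) : Prop := out = is_machinesensor_alt machine_name sensor_name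
instance (machine_name : String) (sensor_name : String) (out : Bool) : Decidable (Spec_is_machinesensor machine_name sensor_name out) := by unfold Spec_is_machinesensor; infer_instance

-- ===== CLAIM (what is proved, stated in full; the proofs are below) =====
def Claim_equal_is_machinesensor : Prop := ∀ (machine_name : String) (sensor_name : String), Dom_is_machinesensor machine_name sensor_name → Spec_is_machinesensor machine_name sensor_name (is_machinesensor machine_name sensor_name)

-- ===== LEMMAS AND PROOFS =====
-- A's inner loop over pairs (ms, mn) is a scan for sn (mn == mn is always true)
theorem isLoopA_map_any (l : List String) (mn sn : String) :
    isLoopA (l.map (fun ms => (ms, mn))) mn sn = l.any (fun ms => ms == sn) := by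
  induction l with
  | nil => rfl
  | cons k rest ih => by_cases h : k = sn <;> simp [isLoopA, ih, h]

-- first-match lookup in an assoc list with distinct keys equals a full scan
theorem find?_match_eq_any (l : List (String × String)) (mn sn : String)
    (hnd : (l.map Prod.fst).Nodup) :
    (match l.find? (fun p => p.1 == sn) with
      | some p => p.2 == mn
      | none => false)
    = l.any (fun p => p.2 == mn && p.1 == sn) := by
  induction l with
  | nil => rfl
  | cons q rest ih =>
    simp only [List.map_cons, List.nodup_cons] at hnd
    cases hq : (q.1 == sn) with
    | true =>
      have hk : q.1 = sn := eq_of_beq hq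
      subst hk
      have hrest : rest.any (fun p => p.2 == mn && p.1 == q.1) = false := by
        simp only [List.any_eq_false]
        intro p hp
        have : p.1 ≠ q.1 := fun h => hnd.1 (h ▸ List.mem_map_of_mem hp)
        simp [this]
      simp [List.find?, List.any, hrest]
    | false => simp [List.find?, List.any, hq, ih hnd.2]

theorem is_machinesensor_eq_alt (mn sn : String) :
    is_machinesensor mn sn = is_machinesensor_alt mn sn := by
  have hA : is_machinesensor mn sn
      = (PySem.Dict.keys machineSensors).any (fun ms => msMachine ms == mn && ms == sn) := by
    rw [is_machinesensor, get_sensors, PySem.List.foldl_append_if, List.nil_append,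
      isLoopA_map_any, List.any_filter]
  have hB : is_machinesensor_alt mn sn
      = sensorToMachine.items.any (fun p => p.2 == mn && p.1 == sn) := by
    rw [is_machinesensor_alt, ← find?_match_eq_any sensorToMachine.items mn sn (by decide)]
    rcases hf : sensorToMachine.items.find? (fun p => p.1 == sn) with _ | p <;>
      simp [PySem.Dict.get?, hf]
  rw [hA, hB]
  simp [machineSensors, sensorToMachine, msMachine, PySem.Dict.keys, PySem.Dict.getD,
    PySem.Dict.get?, List.find?, List.any]

-- ===== VERDICT (by name: the statement is the Claim_ definition above) =====
theorem is_machinesensor_spec : Claim_equal_is_machinesensor := by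
  intro mn sn _
  exact is_machinesensor_eq_alt mn sn
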